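-- pv_equiv track=rewrite | github.com/marco4512/Proyectos-Python | Algoritmo.py | dos_digitos
-- ===== SOURCE A (Python) =====
-- def dos_digitos(numero,lista):
--     str_numero=str(numero)
--     digito_uno=str_numero[0]
--     dos = [n for n in lista if n < 100 and n >= 10]
--     if(numero%2==0):
--         dos_par=[n for n in dos if n%2==0]
--
--         lista_uno=[]
--         for i in dos_par:
--             aux=str(i)
--             if digito_uno==aux[0]:
--                 lista_uno.append(i)
--         if(len(lista_uno)>=1):
--
--             lista_final = []
--             for n in lista_uno:
--                 if (numero < n):
--                     lista_final.append(n - numero)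
--                 else:
--                     lista_final.append(numero - n)
--             indice = min(lista_final)
--             indice = lista_final.index(indice)
--
--             return lista_uno[indice]
--         else:
--
--             return 0
--     else:
--         dos_impar=[n for n in dos if n%2!=0]
--
--         lista_uno = []
--         for i in dos_impar:
--             aux = str(i)
--             if digito_uno == aux[0]:
--                 lista_uno.append(i)
--         if (len(lista_uno) >= 1):
--
--             lista_final = []
--             for n in lista_uno:
--                 if (numero < n):
--                     lista_final.append(n - numero)
--                 else:
--                     lista_final.append(numero - n)
--             indice = min(lista_final)
--             indice = lista_final.index(indice)
--
--             return lista_uno[indice]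
--
--         else:
--
--             return 0
-- ===== SOURCE B (Python) =====
-- def dos_digitos(numero, lista):
--     d = str(numero)[0]
--     best = None
--     for n in lista:
--         if 10 <= n < 100 and n % 2 == numero % 2 and str(n)[0] == d:
--             if best is None or abs(n - numero) < abs(best - numero):
--                 best = n
--     return 0 if best is None else best
-- ===== Notes on version B (the rewrite author's own statement) =====
-- stated objective: simpler
-- what changed: A's duplicated even/odd branches each building a filtered list, a difference list, its min and its index are collapsed into one left-to-right pass that keeps the closest matching candidate seen so far (first-seen wins ties, matching A's min+index tie-breaking).
import Mathlib
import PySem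

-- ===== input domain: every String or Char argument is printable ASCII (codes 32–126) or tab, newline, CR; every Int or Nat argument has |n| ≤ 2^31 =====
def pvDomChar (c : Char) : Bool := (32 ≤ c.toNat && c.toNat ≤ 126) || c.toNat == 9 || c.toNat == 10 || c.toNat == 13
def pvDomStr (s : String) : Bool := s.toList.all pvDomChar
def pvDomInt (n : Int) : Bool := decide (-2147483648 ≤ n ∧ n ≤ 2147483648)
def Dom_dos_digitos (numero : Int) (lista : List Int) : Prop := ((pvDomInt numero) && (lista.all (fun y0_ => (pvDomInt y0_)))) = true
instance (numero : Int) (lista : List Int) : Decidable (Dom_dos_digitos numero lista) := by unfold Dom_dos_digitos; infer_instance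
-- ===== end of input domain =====

-- B replaces A's duplicated parity branches and its difference-list / min / index construction by a
-- single left-to-right pass keeping the closest candidate so far (objective: simpler).

-- ===== PORT A =====
-- A's two parity branches are literally identical code apart from the candidate list;
-- this helper is that shared branch body (lista_uno loop, lista_final loop, min, index, get).
def pvABranch (numero : Int) (digito_uno : Option Char) (cand : List Int) : Int :=
  let lista_uno := cand.foldl (fun acc i =>
      if digito_uno == PySem.Str.pyGet? (PySem.Int.toStr i) 0 then acc ++ [i] else acc) []
  if lista_uno.length ≥ 1 then
    let lista_final := lista_uno.foldl (fun acc n =>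
        if numero < n then acc ++ [n - numero] else acc ++ [numero - n]) []
    match PySem.List.min? lista_final (fun x => x) with
    | none => 0          -- unreachable: lista_final is nonempty here
    | some m =>
      match PySem.List.index? lista_final m with
      | none => 0        -- unreachable: m ∈ lista_final
      | some indice => (PySem.List.pyGet? lista_uno (indice : Int)).getD 0  -- index always in range
  else 0

def dos_digitos (numero : Int) (lista : List Int) : Int :=
  let str_numero := PySem.Int.toStr numero
  let digito_uno := PySem.Str.pyGet? str_numero 0
  let dos := lista.filter (fun n => decide (n < 100) && decide (n ≥ 10))
  if PySem.Int.mod numero 2 = 0 then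
    let dos_par := dos.filter (fun n => decide (PySem.Int.mod n 2 = 0))
    pvABranch numero digito_uno dos_par
  else
    let dos_impar := dos.filter (fun n => decide (PySem.Int.mod n 2 ≠ 0))
    pvABranch numero digito_uno dos_impar

-- ===== PORT B =====
def pvBStep (numero : Int) (d : Option Char) (best : Option Int) (n : Int) : Option Int :=
  if 10 ≤ n ∧ n < 100 ∧ PySem.Int.mod n 2 = PySem.Int.mod numero 2
      ∧ PySem.Str.pyGet? (PySem.Int.toStr n) 0 = d then
    match best with
    | none => some n
    | some b => if |n - numero| < |b - numero| then some n else some b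
  else best

def dos_digitos_alt (numero : Int) (lista : List Int) : Int :=
  let d := PySem.Str.pyGet? (PySem.Int.toStr numero) 0
  match lista.foldl (pvBStep numero d) none with
  | none => 0
  | some b => b

-- ===== PRECONDITION & SPEC =====
def Spec_dos_digitos (numero : Int) (lista : List Int) (out : Int) : Prop := out = dos_digitos_alt numero lista
instance (numero : Int) (lista : List Int) (out : Int) : Decidable (Spec_dos_digitos numero lista out) := by unfold Spec_dos_digitos; infer_instance

-- ===== CLAIM (what is proved, stated in full; the proofs are below) =====
def Claim_equal_dos_digitos : Prop := ∀ (numero : Int) (lista : List Int), Dom_dos_digitos numero lista → Spec_dos_digitos numero lista (dos_digitos numero lista)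

-- ===== LEMMAS AND PROOFS =====

-- first element of x :: xs (scanning left to right) minimising f — the common shape of both programs
def pvFam (f : Int → Int) : Int → List Int → Int
  | x, [] => x
  | x, y :: ys => if f y < f x then pvFam f y ys else pvFam f x ys

-- A's "min of the difference list, then index, then get" core, on an abstract candidate list
def pvACore (f : Int → Int) (L : List Int) : Int :=
  match PySem.List.min? (L.map f) (fun x => x) with
  | none => 0
  | some m =>
    match PySem.List.index? (L.map f) m with
    | none => 0
    | some idx => (PySem.List.pyGet? L (idx : Int)).getD 0

lemma foldl_min_le (l : List Int) (b : Int) : l.foldl min b ≤ b := by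
  induction l generalizing b with
  | nil => simp
  | cons y ys ih => simpa using le_trans (ih (min b y)) (min_le_left _ _)


lemma pvACore_cons (f : Int → Int) (xs : List Int) : ∀ x, pvACore f (x :: xs) = pvFam f x xs := by
  induction xs with
  | nil =>
    intro x
    simp [pvACore, pvFam, PySem.List.min?_id_cons]
  | cons y ys ih =>
    intro x
    by_cases h : f y < f x
    · -- the head x can never be the first argmin: drop it
      have hm : pvACore f (x :: y :: ys) = pvACore f (y :: ys) := by
        unfold pvACore
        simp only [List.map_cons, PySem.List.min?_id_cons, List.foldl_cons]
        have hle : (List.map f ys).foldl min (min (f x) (f y)) ≤ f y := by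
          have := foldl_min_le (List.map f ys) (min (f x) (f y))
          exact le_trans this (min_le_right _ _)
        have hmin : min (f x) (f y) = f y := min_eq_right (le_of_lt h)
        rw [hmin]
        have hne : f x ≠ (List.map f ys).foldl min (f y) := by
          have : (List.map f ys).foldl min (f y) ≤ f y := foldl_min_le _ _
          omega
        rw [PySem.List.index?_cons_of_ne _ hne]
        cases hidx : PySem.List.index? (f y :: List.map f ys) ((List.map f ys).foldl min (f y)) with
        | none => simp
        | some j =>
          simp only [Option.map_some]
          have : ((j + 1 : Nat) : Int) = ((j : Nat) : Int) + 1 := by push_cast; ring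
          rw [PySem.List.pyGet?_natCast, PySem.List.pyGet?_natCast]
          simp
      rw [hm, ih y]
      simp [pvFam, h]
    · -- f x ≤ f y : y can never be the first argmin: drop it
      have hxy : f x ≤ f y := le_of_not_gt h
      have hm : pvACore f (x :: y :: ys) = pvACore f (x :: ys) := by
        unfold pvACore
        simp only [List.map_cons, PySem.List.min?_id_cons, List.foldl_cons]
        have hmin : min (f x) (f y) = f x := min_eq_left hxy
        rw [hmin]
        set m := (List.map f ys).foldl min (f x) with hmdef
        by_cases hfx : m = f x
        · rw [hfx, PySem.List.index?_cons_self, PySem.List.index?_cons_self]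
          simp
        · have hlt : m < f x := lt_of_le_of_ne (foldl_min_le _ _) hfx
          have hne1 : f x ≠ m := fun hc => hfx hc.symm
          have hne2 : f y ≠ m := by omega
          rw [PySem.List.index?_cons_of_ne _ hne1, PySem.List.index?_cons_of_ne _ hne2,
              PySem.List.index?_cons_of_ne _ hne1]
          cases hidx : PySem.List.index? (List.map f ys) m with
          | none => simp
          | some j =>
            simp only [Option.map_some]
            rw [PySem.List.pyGet?_natCast, PySem.List.pyGet?_natCast]
            simp
      rw [hm, ih x]
      simp [pvFam, h]

lemma branch_eq (numero : Int) (d : Option Char) (cand : List Int) :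
    pvABranch numero d cand =
      match cand.filter (fun i => d == PySem.Str.pyGet? (PySem.Int.toStr i) 0) with
      | [] => 0
      | x :: xs => pvFam (fun n => |n - numero|) x xs := by
  unfold pvABranch
  rw [PySem.List.foldl_append_if_eq_filter]
  simp only [List.nil_append]
  cases hL : cand.filter (fun i => d == PySem.Str.pyGet? (PySem.Int.toStr i) 0) with
  | nil => simp
  | cons x xs =>
    have hlen : (x :: xs).length ≥ 1 := by simp
    simp only [hlen, if_pos]
    have hstep : (fun (acc : List Int) n => if numero < n then acc ++ [n - numero] else acc ++ [numero - n])
        = fun (acc : List Int) n => acc ++ [if numero < n then n - numero else numero - n] := by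
      funext acc n; split <;> rfl
    rw [hstep, PySem.List.foldl_append_singleton_eq_map, List.nil_append]
    have hf : (fun n => if numero < n then n - numero else numero - n) = fun n => |n - numero| := by
      funext n
      rcases abs_cases (n - numero) with ⟨h1, h2⟩ | ⟨h1, h2⟩ <;> split <;> omega
    rw [hf]
    exact pvACore_cons (fun n => |n - numero|) xs x

-- B's fold, after the filter is pulled out of the step
lemma foldB_some (numero : Int) (xs : List Int) : ∀ b,
    xs.foldl (fun (best : Option Int) n =>
        match best with
        | none => some n
        | some bb => if |n - numero| < |bb - numero| then some n else some bb) (some b)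
      = some (pvFam (fun n => |n - numero|) b xs) := by
  induction xs with
  | nil => intro b; simp [pvFam]
  | cons y ys ih =>
    intro b
    simp only [List.foldl_cons]
    by_cases h : |y - numero| < |b - numero| <;> simp [h, pvFam, ih]

lemma alt_eq (numero : Int) (lista : List Int) :
    dos_digitos_alt numero lista =
      match lista.filter (fun n => decide (10 ≤ n ∧ n < 100 ∧ PySem.Int.mod n 2 = PySem.Int.mod numero 2
          ∧ PySem.Str.pyGet? (PySem.Int.toStr n) 0 = PySem.Str.pyGet? (PySem.Int.toStr numero) 0)) with
      | [] => 0
      | x :: xs => pvFam (fun n => |n - numero|) x xs := by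
  show (match lista.foldl (pvBStep numero (PySem.Str.pyGet? (PySem.Int.toStr numero) 0)) none with
    | none => 0
    | some b => b) = _
  have hstep : (pvBStep numero (PySem.Str.pyGet? (PySem.Int.toStr numero) 0))
      = fun (best : Option Int) n =>
        if (decide (10 ≤ n ∧ n < 100 ∧ PySem.Int.mod n 2 = PySem.Int.mod numero 2
            ∧ PySem.Str.pyGet? (PySem.Int.toStr n) 0 = PySem.Str.pyGet? (PySem.Int.toStr numero) 0)) = true then
          (match best with
           | none => some n
           | some bb => if |n - numero| < |bb - numero| then some n else some bb)
        else best := by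
    funext best n
    unfold pvBStep
    by_cases h : 10 ≤ n ∧ n < 100 ∧ PySem.Int.mod n 2 = PySem.Int.mod numero 2
        ∧ PySem.Str.pyGet? (PySem.Int.toStr n) 0 = PySem.Str.pyGet? (PySem.Int.toStr numero) 0 <;>
      simp [h]
  rw [hstep, PySem.List.foldl_if_eq_foldl_filter]
  cases hL : lista.filter (fun n => decide (10 ≤ n ∧ n < 100 ∧ PySem.Int.mod n 2 = PySem.Int.mod numero 2
      ∧ PySem.Str.pyGet? (PySem.Int.toStr n) 0 = PySem.Str.pyGet? (PySem.Int.toStr numero) 0)) with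
  | nil => simp
  | cons x xs =>
    simp only [List.foldl_cons]
    rw [foldB_some]

-- the chained filters of A coincide with B's single filter
lemma filters_eq (numero : Int) (lista : List Int) :
    (((lista.filter (fun n => decide (n < 100) && decide (n ≥ 10))).filter
        (fun n => if PySem.Int.mod numero 2 = 0 then decide (PySem.Int.mod n 2 = 0)
                  else decide (PySem.Int.mod n 2 ≠ 0))).filter
        (fun i => PySem.Str.pyGet? (PySem.Int.toStr numero) 0 == PySem.Str.pyGet? (PySem.Int.toStr i) 0))
    = lista.filter (fun n => decide (10 ≤ n ∧ n < 100 ∧ PySem.Int.mod n 2 = PySem.Int.mod numero 2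
        ∧ PySem.Str.pyGet? (PySem.Int.toStr n) 0 = PySem.Str.pyGet? (PySem.Int.toStr numero) 0)) := by
  rw [List.filter_filter, List.filter_filter]
  apply List.filter_congr
  intro n _
  rcases PySem.Int.mod_two_eq numero with hp | hp <;>
    rcases PySem.Int.mod_two_eq n with hn | hn <;>
      simp only [hp, hn] <;>
        (have hd' : (PySem.List.pyGet? (PySem.Int.toChars numero) 0 = PySem.List.pyGet? (PySem.Int.toChars n) 0)
            ↔ (PySem.List.pyGet? (PySem.Int.toChars n) 0 = PySem.List.pyGet? (PySem.Int.toChars numero) 0) := eq_comm) <;>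
        by_cases hd : PySem.List.pyGet? (PySem.Int.toChars n) 0 = PySem.List.pyGet? (PySem.Int.toChars numero) 0 <;>
          by_cases h1 : n < 100 <;> by_cases h2 : 10 ≤ n <;>
            (rw [Bool.eq_iff_iff]; simp [hd', hd, h1, h2])

-- ===== VERDICT (by name: the statement is the Claim_ definition above) =====
theorem dos_digitos_spec : Claim_equal_dos_digitos := by
  intro numero lista _
  unfold Spec_dos_digitos
  rw [alt_eq]
  unfold dos_digitos
  by_cases hpar : PySem.Int.mod numero 2 = 0
  · rw [if_pos hpar, branch_eq,
      show (fun n => decide (PySem.Int.mod n 2 = 0))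
          = (fun n => if PySem.Int.mod numero 2 = 0 then decide (PySem.Int.mod n 2 = 0)
                      else decide (PySem.Int.mod n 2 ≠ 0))
        from funext fun n => (if_pos hpar).symm,
      filters_eq]
  · rw [if_neg hpar, branch_eq,
      show (fun n => decide (PySem.Int.mod n 2 ≠ 0))
          = (fun n => if PySem.Int.mod numero 2 = 0 then decide (PySem.Int.mod n 2 = 0)
                      else decide (PySem.Int.mod n 2 ≠ 0))
        from funext fun n => (if_neg hpar).symm,
      filters_eq]
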